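-- pv_equiv track=rewrite | github.com/ad1729-math/DP-Files | Hyp_Pfaff Arm Chair.py | Layers
-- ===== SOURCE A (Python) =====
-- def Layers(n,g):
--     if g==-1:
--         return 0,0,0,0
--     elif g==0:
--         return 0,n,0,n
--     else:
--         n0,n1,N0,N1=0,n,0,n
--         for i in range(1,g+1):
--             a,b=n0,n1
--             n0=b
--             n1=(n-4)*b-a
--             N0+=n0
--             N1+=n1
--         return n0,n1,N0,N1
-- ===== SOURCE B (Python) =====
-- def _m2_mul(A, B):
--     return ((A[0][0] * B[0][0] + A[0][1] * B[1][0], A[0][0] * B[0][1] + A[0][1] * B[1][1]),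
--             (A[1][0] * B[0][0] + A[1][1] * B[1][0], A[1][0] * B[0][1] + A[1][1] * B[1][1]))
--
--
-- def _m2_add(A, B):
--     return ((A[0][0] + B[0][0], A[0][1] + B[0][1]),
--             (A[1][0] + B[1][0], A[1][1] + B[1][1]))
--
--
-- def _pow_sum(C, k):
--     # returns (C**k, C + C**2 + ... + C**k) by binary doubling:
--     # C**(2m) = (C**m)**2,  S(2m) = S(m) + C**m * S(m),  then one more factor of C if k is odd
--     if k == 0:
--         return ((1, 0), (0, 1)), ((0, 0), (0, 0))
--     P, S = _pow_sum(C, k // 2)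
--     P2 = _m2_mul(P, P)
--     S2 = _m2_add(S, _m2_mul(P, S))
--     if k % 2 == 1:
--         P2 = _m2_mul(P2, C)
--         S2 = _m2_add(S2, P2)
--     return P2, S2
--
--
-- def Layers(n, g):
--     if g == -1:
--         return 0, 0, 0, 0
--     if g <= 0:
--         return 0, n, 0, n
--     t = n - 4
--     C = ((0, 1), (-1, t))
--     P, S = _pow_sum(C, g)
--     # state vector v = (n0, n1) starts at (0, n); sums start at (0, n)
--     n0 = P[0][0] * 0 + P[0][1] * n
--     n1 = P[1][0] * 0 + P[1][1] * n
--     N0 = S[0][0] * 0 + S[0][1] * n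
--     N1 = n + S[1][0] * 0 + S[1][1] * n
--     return n0, n1, N0, N1
-- ===== Notes on version B (the rewrite author's own statement) =====
-- stated objective: faster
-- what changed: replaces the O(g) step-by-step iteration of the recurrence (with running sums) by binary doubling of the 2x2 companion matrix together with its partial geometric sum; intended as faster (O(log g) matrix operations), measured 3.9x at the largest size both finished
import Mathlib
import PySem

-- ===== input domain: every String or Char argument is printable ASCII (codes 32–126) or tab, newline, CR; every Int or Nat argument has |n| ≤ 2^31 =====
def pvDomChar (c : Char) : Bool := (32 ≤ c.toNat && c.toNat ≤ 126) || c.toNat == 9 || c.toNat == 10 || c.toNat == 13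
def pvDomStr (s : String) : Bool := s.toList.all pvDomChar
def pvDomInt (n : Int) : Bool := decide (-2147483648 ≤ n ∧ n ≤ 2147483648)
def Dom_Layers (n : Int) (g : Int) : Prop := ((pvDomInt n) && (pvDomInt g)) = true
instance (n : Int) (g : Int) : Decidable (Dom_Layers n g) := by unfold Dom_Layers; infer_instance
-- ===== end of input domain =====

-- B replaces A's g-step iteration by binary doubling of the 2x2 companion matrix together with
-- its partial geometric sum; intended as faster (measured 3.9x at the largest size both finished).

-- ===== PORT A =====
-- the loop body: a,b = n0,n1; n0 = b; n1 = (n-4)*b-a; N0 += n0; N1 += n1  (i is unused)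
def LayersStep (n : Int) (s : Int × Int × Int × Int) : Int × Int × Int × Int :=
  match s with
  | (n0, n1, N0, N1) => (n1, (n - 4) * n1 - n0, N0 + n1, N1 + ((n - 4) * n1 - n0))

def Layers (n : Int) (g : Int) : List Int :=
  if g == -1 then [0, 0, 0, 0]
  else if g == 0 then [0, n, 0, n]
  else
    match (PySem.List.pyRange 1 (g + 1) 1).foldl (fun s _ => LayersStep n s) (0, n, 0, n) with
    | (n0, n1, N0, N1) => [n0, n1, N0, N1]

-- ===== PORT B =====
-- a 2x2 integer matrix, Source B's tuple of 2 row tuples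
structure Mat2 where
  b00 : Int
  b01 : Int
  b10 : Int
  b11 : Int
deriving Repr, DecidableEq

-- Source B's _m2_mul
def Mat2.mul (A B : Mat2) : Mat2 :=
  ⟨A.b00 * B.b00 + A.b01 * B.b10, A.b00 * B.b01 + A.b01 * B.b11,
   A.b10 * B.b00 + A.b11 * B.b10, A.b10 * B.b01 + A.b11 * B.b11⟩

-- Source B's _m2_add
def Mat2.add (A B : Mat2) : Mat2 :=
  ⟨A.b00 + B.b00, A.b01 + B.b01, A.b10 + B.b10, A.b11 + B.b11⟩

def matTwoOne : Mat2 := ⟨1, 0, 0, 1⟩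
def matTwoZero : Mat2 := ⟨0, 0, 0, 0⟩

-- Source B's _pow_sum: (C^k, C + C^2 + ... + C^k) by binary doubling:
-- C^(2m) = (C^m)^2, S(2m) = S(m) + C^m * S(m), then one more factor of C if k is odd
def powSum (C : Mat2) (k : Nat) : Mat2 × Mat2 :=
  if k = 0 then (matTwoOne, matTwoZero)
  else
    let PS := powSum C (k / 2)
    let P2 := PS.1.mul PS.1
    let S2 := PS.2.add (PS.1.mul PS.2)
    if k % 2 = 1 then
      let P3 := P2.mul C
      (P3, S2.add P3)
    else (P2, S2)
  decreasing_by omega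

def Layers_alt (n : Int) (g : Int) : List Int :=
  if g == -1 then [0, 0, 0, 0]
  else if g ≤ 0 then [0, n, 0, n]
  else
    let t := n - 4
    let C : Mat2 := ⟨0, 1, -1, t⟩
    let PS := powSum C g.toNat
    let P := PS.1
    let S := PS.2
    -- state vector v = (n0, n1) starts at (0, n); sums start at (0, n)
    [P.b00 * 0 + P.b01 * n, P.b10 * 0 + P.b11 * n,
     S.b00 * 0 + S.b01 * n, n + (S.b10 * 0 + S.b11 * n)]

-- ===== PRECONDITION & SPEC =====
def Spec_Layers (n : Int) (g : Int) (out : List Int) : Prop := out = Layers_alt n g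
instance (n : Int) (g : Int) (out : List Int) : Decidable (Spec_Layers n g out) := by unfold Spec_Layers; infer_instance

-- ===== CLAIM (what is proved, stated in full; the proofs are below) =====
def Claim_equal_Layers : Prop := ∀ (n : Int) (g : Int), Dom_Layers n g → Spec_Layers n g (Layers n g)

-- ===== LEMMAS AND PROOFS =====

-- reference semantics: plain powers and plain partial sums
def m2pow (C : Mat2) : Nat → Mat2
  | 0 => matTwoOne
  | k + 1 => (m2pow C k).mul C

def m2sum (C : Mat2) : Nat → Mat2
  | 0 => matTwoZero
  | k + 1 => (m2sum C k).add (m2pow C (k + 1))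

lemma Mat2.mul_assoc (A B C : Mat2) : (A.mul B).mul C = A.mul (B.mul C) := by
  cases A; cases B; cases C
  simp only [Mat2.mul, Mat2.mk.injEq]
  refine ⟨by ring, by ring, by ring, by ring⟩

lemma Mat2.one_mul (A : Mat2) : matTwoOne.mul A = A := by
  cases A
  simp only [Mat2.mul, matTwoOne, Mat2.mk.injEq]
  refine ⟨by ring, by ring, by ring, by ring⟩

lemma Mat2.mul_one (A : Mat2) : A.mul matTwoOne = A := by
  cases A
  simp only [Mat2.mul, matTwoOne, Mat2.mk.injEq]
  refine ⟨by ring, by ring, by ring, by ring⟩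

lemma Mat2.mul_zero (A : Mat2) : A.mul matTwoZero = matTwoZero := by
  cases A
  simp only [Mat2.mul, matTwoZero, Mat2.mk.injEq]
  refine ⟨by ring, by ring, by ring, by ring⟩

lemma Mat2.add_zero (A : Mat2) : A.add matTwoZero = A := by
  cases A
  simp only [Mat2.add, matTwoZero, Mat2.mk.injEq]
  refine ⟨by ring, by ring, by ring, by ring⟩

lemma Mat2.mul_add (A B C : Mat2) : A.mul (B.add C) = (A.mul B).add (A.mul C) := by
  cases A; cases B; cases C
  simp only [Mat2.mul, Mat2.add, Mat2.mk.injEq]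
  refine ⟨by ring, by ring, by ring, by ring⟩

lemma Mat2.add_assoc (A B C : Mat2) : (A.add B).add C = A.add (B.add C) := by
  cases A; cases B; cases C
  simp only [Mat2.add, Mat2.mk.injEq]
  refine ⟨by ring, by ring, by ring, by ring⟩

lemma m2pow_add (C : Mat2) (a b : Nat) :
    m2pow C (a + b) = (m2pow C a).mul (m2pow C b) := by
  induction b with
  | zero => simp [m2pow, Mat2.mul_one]
  | succ b ih =>
    show m2pow C (a + b + 1) = (m2pow C a).mul ((m2pow C b).mul C)
    rw [m2pow, ih, Mat2.mul_assoc]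

lemma m2pow_succ' (C : Mat2) (k : Nat) : m2pow C (k + 1) = C.mul (m2pow C k) := by
  have h : k + 1 = 1 + k := by omega
  rw [h, m2pow_add]
  show (matTwoOne.mul C).mul (m2pow C k) = C.mul (m2pow C k)
  rw [Mat2.one_mul]

lemma m2sum_split (C : Mat2) (a b : Nat) :
    m2sum C (a + b) = (m2sum C a).add ((m2pow C a).mul (m2sum C b)) := by
  induction b with
  | zero => simp [m2sum, Mat2.mul_zero, Mat2.add_zero]
  | succ b ih =>
    show m2sum C (a + b + 1) = (m2sum C a).add ((m2pow C a).mul ((m2sum C b).add (m2pow C (b + 1))))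
    rw [m2sum, ih, Mat2.mul_add, Mat2.add_assoc, ← m2pow_add]
    have h : a + (b + 1) = a + b + 1 := by omega
    rw [h]

lemma powSum_eq (C : Mat2) (k : Nat) :
    powSum C k = (m2pow C k, m2sum C k) := by
  induction k using Nat.strong_induction_on with
  | _ k ih =>
    rw [powSum]
    by_cases h0 : k = 0
    · simp [h0, m2pow, m2sum]
    · simp only [if_neg h0]
      have hlt : k / 2 < k := by omega
      rw [ih (k / 2) hlt]
      have hP : (m2pow C (k / 2)).mul (m2pow C (k / 2)) = m2pow C (k / 2 + k / 2) :=
        (m2pow_add C _ _).symm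
      have hS : (m2sum C (k / 2)).add ((m2pow C (k / 2)).mul (m2sum C (k / 2)))
          = m2sum C (k / 2 + k / 2) := (m2sum_split C _ _).symm
      by_cases hodd : k % 2 = 1
      · simp only [if_pos hodd]
        have hk : k = (k / 2 + k / 2) + 1 := by omega
        rw [hP, hS]
        conv_rhs => rw [hk]
        rfl
      · simp only [if_neg hodd]
        have hk : k = k / 2 + k / 2 := by omega
        rw [hP, hS, ← hk]

-- applying a 2x2 matrix to a column vector
def Mat2.app (A : Mat2) (v : Int × Int) : Int × Int :=
  (A.b00 * v.1 + A.b01 * v.2, A.b10 * v.1 + A.b11 * v.2)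

lemma Mat2.app_mul (A B : Mat2) (v : Int × Int) :
    (A.mul B).app v = A.app (B.app v) := by
  cases A; cases B; obtain ⟨x, y⟩ := v
  simp only [Mat2.mul, Mat2.app, Prod.mk.injEq]
  refine ⟨by ring, by ring⟩

lemma Mat2.app_add (A B : Mat2) (v : Int × Int) :
    ((A.add B).app v).1 = (A.app v).1 + (B.app v).1 ∧
    ((A.add B).app v).2 = (A.app v).2 + (B.app v).2 := by
  cases A; cases B; obtain ⟨x, y⟩ := v
  simp only [Mat2.add, Mat2.app]
  refine ⟨by ring, by ring⟩

-- the loop invariant: A's state after k steps, expressed through powers and sums of the companion matrix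
lemma iterate_eq_powsum (n : Int) (k : Nat) :
    (LayersStep n)^[k] (0, n, 0, n) =
      (((m2pow ⟨0, 1, -1, n - 4⟩ k).app (0, n)).1,
       ((m2pow ⟨0, 1, -1, n - 4⟩ k).app (0, n)).2,
       ((m2sum ⟨0, 1, -1, n - 4⟩ k).app (0, n)).1,
       n + ((m2sum ⟨0, 1, -1, n - 4⟩ k).app (0, n)).2) := by
  induction k with
  | zero =>
    simp [m2pow, m2sum, matTwoOne, matTwoZero, Mat2.app]
  | succ k ih =>
    rw [Function.iterate_succ_apply', ih]
    have hp : m2pow ⟨0, 1, -1, n - 4⟩ (k + 1)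
        = Mat2.mul ⟨0, 1, -1, n - 4⟩ (m2pow ⟨0, 1, -1, n - 4⟩ k) := m2pow_succ' _ _
    have hs := Mat2.app_add (m2sum ⟨0, 1, -1, n - 4⟩ k) (m2pow ⟨0, 1, -1, n - 4⟩ (k + 1)) (0, n)
    rw [show m2sum ⟨0, 1, -1, n - 4⟩ (k + 1)
        = (m2sum ⟨0, 1, -1, n - 4⟩ k).add (m2pow ⟨0, 1, -1, n - 4⟩ (k + 1)) from rfl]
    rw [hs.1, hs.2, hp, Mat2.app_mul]
    obtain ⟨a, b⟩ := (m2pow ⟨0, 1, -1, n - 4⟩ k).app (0, n)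
    simp only [LayersStep, Mat2.app, Prod.mk.injEq]
    refine ⟨by ring, by ring, by ring, by ring⟩

-- fold with an element-ignoring body is function iteration
lemma foldl_const_iterate {α β : Type} (f : α → α) (l : List β) (s : α) :
    l.foldl (fun a _ => f a) s = f^[l.length] s := by
  induction l generalizing s with
  | nil => rfl
  | cons x xs ih => simp [List.foldl, ih, Function.iterate_succ_apply]

-- ===== VERDICT (by name: the statement is the Claim_ definition above) =====
theorem Layers_spec : Claim_equal_Layers := by
  intro n g _
  show Layers n g = Layers_alt n g
  unfold Layers Layers_alt
  by_cases h1 : g = -1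
  · simp [h1]
  · simp only [beq_iff_eq, if_neg h1]
    by_cases h0 : g = 0
    · simp [h0]
    · simp only [if_neg h0]
      by_cases hle : g ≤ 0
      · rw [if_pos hle, PySem.List.pyRange_one_eq_nil (by omega)]
        rfl
      · rw [if_neg hle]
        rw [foldl_const_iterate (LayersStep n), PySem.List.length_pyRange_one]
        have hlen : (g + 1 - 1).toNat = g.toNat := by omega
        rw [hlen, iterate_eq_powsum, powSum_eq]
        simp [Mat2.app]
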